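-- pv_equiv track=rewrite | github.com/Marco-2025/data-structures-and-algorithms | recursion/recursion-fix.py | add_until_100
-- ===== SOURCE A (Python) =====
-- def add_until_100(array):
--     if not array:
--         return 0
--
--     sum_of_the_rest = add_until_100(array[1:])
--
--     if array[0] + sum_of_the_rest > 100:
--         return sum_of_the_rest
--     else:
--         return array[0] + sum_of_the_rest
-- ===== SOURCE B (Python) =====
-- def add_until_100(array):
--     total = 0
--     for element in reversed(array):
--         if element + total > 100:
--             continue
--         total += element
--     return total
-- ===== Notes on version B (the rewrite author's own statement) =====
-- stated objective: faster
-- what changed: Replaced the naive recursion (which copies the tail with array[1:] at every step) by a single iterative reverse-order fold with an accumulator.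
import Mathlib
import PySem

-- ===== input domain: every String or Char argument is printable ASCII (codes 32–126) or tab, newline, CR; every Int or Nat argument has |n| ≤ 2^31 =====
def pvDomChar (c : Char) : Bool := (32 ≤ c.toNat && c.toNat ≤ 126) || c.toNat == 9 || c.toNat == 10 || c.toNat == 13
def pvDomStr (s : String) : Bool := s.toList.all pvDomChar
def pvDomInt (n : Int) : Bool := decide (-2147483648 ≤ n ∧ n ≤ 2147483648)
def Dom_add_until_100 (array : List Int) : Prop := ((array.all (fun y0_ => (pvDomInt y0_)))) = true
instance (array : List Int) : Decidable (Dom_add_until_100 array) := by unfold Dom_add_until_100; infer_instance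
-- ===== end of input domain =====

-- B replaces A's recursion (with its per-call tail copy) by one iterative reverse-order fold; return values proved equal.

-- ===== PORT A =====
def add_until_100 (array : List Int) : Int :=
  match array with
  | [] => 0
  | x :: rest =>
    let sum_of_the_rest := add_until_100 rest
    if x + sum_of_the_rest > 100 then sum_of_the_rest
    else x + sum_of_the_rest

-- ===== PORT B =====
def add_until_100_alt (array : List Int) : Int :=
  array.reverse.foldl (fun total element =>
    if element + total > 100 then total else total + element) 0

-- ===== PRECONDITION & SPEC =====
def Spec_add_until_100 (array : List Int) (out : Int) : Prop := out = add_until_100_alt array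
instance (array : List Int) (out : Int) : Decidable (Spec_add_until_100 array out) := by unfold Spec_add_until_100; infer_instance

-- ===== CLAIM (what is proved, stated in full; the proofs are below) =====
def Claim_equal_add_until_100 : Prop := ∀ (array : List Int), Dom_add_until_100 array → Spec_add_until_100 array (add_until_100 array)

-- ===== LEMMAS AND PROOFS =====
theorem add_until_100_alt_cons (x : Int) (xs : List Int) :
    add_until_100_alt (x :: xs) =
      (if x + add_until_100_alt xs > 100 then add_until_100_alt xs
       else add_until_100_alt xs + x) := by
  simp [add_until_100_alt, List.reverse_cons, List.foldl_append]

-- ===== VERDICT (by name: the statement is the Claim_ definition above) =====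
theorem add_until_100_eq (array : List Int) :
    add_until_100 array = add_until_100_alt array := by
  induction array with
  | nil => rfl
  | cons x xs ih =>
    rw [add_until_100_alt_cons, ← ih]
    simp [add_until_100]
    split_ifs <;> ring

theorem add_until_100_spec : Claim_equal_add_until_100 :=
  fun array _ => add_until_100_eq array
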